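-- pv_equiv track=rewrite | github.com/gongxushuang/refactored-lamp | 偶数_副本.py | oushu
-- ===== SOURCE A (Python) =====
-- def oushu(begin,end):
--     sum=0
--     list=[]
--     for i in range(begin,end+1):
--         if i%2==0:
--             sum+=i
--             list.append(i)
--     return list,sum
-- ===== SOURCE B (Python) =====
-- def oushu(begin, end):
--     # Even numbers in [begin, end] form an arithmetic progression with step 2:
--     # build it directly with range and compute the sum in closed form.
--     first = begin + begin % 2
--     lst = list(range(first, end + 1, 2))
--     n = len(lst)
--     return lst, n * (first + n - 1)
-- ===== Notes on version B (the rewrite author's own statement) =====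
-- stated objective: faster
-- what changed: Replaces the parity-filtered accumulation loop by a direct step-2 range construction plus a closed-form arithmetic-series sum (no iteration for the sum).
import Mathlib
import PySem

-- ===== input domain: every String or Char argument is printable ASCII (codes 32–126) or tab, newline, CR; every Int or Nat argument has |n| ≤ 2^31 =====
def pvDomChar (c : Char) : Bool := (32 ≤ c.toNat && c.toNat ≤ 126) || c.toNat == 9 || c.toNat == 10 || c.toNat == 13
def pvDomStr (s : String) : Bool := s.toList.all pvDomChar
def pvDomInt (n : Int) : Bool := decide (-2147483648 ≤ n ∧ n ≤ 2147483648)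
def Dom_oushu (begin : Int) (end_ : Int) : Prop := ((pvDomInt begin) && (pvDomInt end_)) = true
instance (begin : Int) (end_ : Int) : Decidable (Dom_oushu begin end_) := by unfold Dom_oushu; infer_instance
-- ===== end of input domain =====

-- B replaces A's parity-filtered accumulation loop by a step-2 range plus a closed-form sum (faster by a constant factor).

-- ===== PORT A =====
def oushu (begin : Int) (end_ : Int) : List Int × Int :=
  let st := (PySem.List.pyRange begin (end_ + 1) 1).foldl
    (fun (st : Int × List Int) i =>
      if PySem.Int.mod i 2 = 0 then (st.1 + i, st.2 ++ [i]) else st)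
    (0, [])
  (st.2, st.1)

-- ===== PORT B =====
def oushu_alt (begin : Int) (end_ : Int) : List Int × Int :=
  let first := begin + PySem.Int.mod begin 2
  let lst := PySem.List.pyRange first (end_ + 1) 2
  let n : Int := lst.length
  (lst, n * (first + n - 1))

-- ===== PRECONDITION & SPEC =====
def Spec_oushu (begin : Int) (end_ : Int) (out : List Int × Int) : Prop := out = oushu_alt begin end_
instance (begin : Int) (end_ : Int) (out : List Int × Int) : Decidable (Spec_oushu begin end_ out) := by unfold Spec_oushu; infer_instance

-- ===== CLAIM (what is proved, stated in full; the proofs are below) =====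
def Claim_equal_oushu : Prop := ∀ (begin : Int) (end_ : Int), Dom_oushu begin end_ → Spec_oushu begin end_ (oushu begin end_)

-- ===== LEMMAS AND PROOFS =====

-- A's loop accumulates the sum and the list of the even elements.
lemma oushu_foldl (xs : List Int) (s : Int) (l : List Int) :
    xs.foldl
      (fun (st : Int × List Int) i =>
        if PySem.Int.mod i 2 = 0 then (st.1 + i, st.2 ++ [i]) else st)
      (s, l)
    = (s + (xs.filter (fun i => decide (PySem.Int.mod i 2 = 0))).sum,
       l ++ xs.filter (fun i => decide (PySem.Int.mod i 2 = 0))) := by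
  induction xs generalizing s l with
  | nil => simp
  | cons x xs ih =>
    simp only [List.foldl_cons]
    by_cases hx : PySem.Int.mod x 2 = 0
    · rw [if_pos hx, ih, List.filter_cons_of_pos (by rw [hx]; decide)]
      simp only [Prod.mk.injEq, List.sum_cons, List.append_assoc, List.singleton_append,
        and_true]
      ring
    · rw [if_neg hx, ih, List.filter_cons_of_neg (by simp only [decide_eq_true_eq]; exact hx)]

lemma pyRange_two_nil {a b : Int} (h : b ≤ a) : PySem.List.pyRange a b 2 = [] := by
  rw [PySem.List.pyRange_of_pos a b (by norm_num)]
  simp [if_neg (by omega : ¬ a < b)]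

lemma pyRange_two_cons {a b : Int} (h : a < b) :
    PySem.List.pyRange a b 2 = a :: PySem.List.pyRange (a + 2) b 2 := by
  rw [PySem.List.pyRange_of_pos a b (by norm_num),
      PySem.List.pyRange_of_pos (a + 2) b (by norm_num)]
  by_cases h2 : a + 2 < b
  · rw [if_pos h, if_pos h2]
    have hn : ((b - a + 2 - 1) / 2).toNat = ((b - (a + 2) + 2 - 1) / 2).toNat + 1 := by omega
    rw [hn, List.range_succ_eq_map]
    simp [Function.comp, mul_add]
    ring_nf
    simp
  · rw [if_pos h, if_neg h2]
    have hn : ((b - a + 2 - 1) / 2).toNat = 1 := by omega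
    simp [hn]

-- the even elements of range(a, b) are exactly range(a + a % 2, b, 2)
lemma filter_even_pyRange (a b : Int) :
    (PySem.List.pyRange a b 1).filter (fun i => decide (i % 2 = 0))
      = PySem.List.pyRange (a + a % 2) b 2 := by
  by_cases hab : a < b
  · rw [PySem.List.pyRange_one_cons hab, List.filter_cons]
    by_cases ha : a % 2 = 0
    · have h0 := filter_even_pyRange (a + 1) b
      have h1 : (a + 1) % 2 = 1 := by omega
      rw [h1] at h0
      have e : a + 1 + 1 = a + 2 := by ring
      rw [e] at h0
      simp only [ha, decide_true, if_true, h0, add_zero]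
      rw [pyRange_two_cons hab]
    · have h0 := filter_even_pyRange (a + 1) b
      have h1 : (a + 1) % 2 = 0 := by omega
      have h2 : a % 2 = 1 := by omega
      rw [h1, add_zero] at h0
      simp only [h0, h2]
      norm_num
  · rw [PySem.List.pyRange_one_eq_nil (by omega), pyRange_two_nil (by omega)]
    simp
termination_by (b - a).toNat
decreasing_by all_goals omega

-- closed-form sum of a step-2 range
lemma sum_pyRange_two (a b : Int) :
    (PySem.List.pyRange a b 2).sum
      = (PySem.List.pyRange a b 2).length * (a + (PySem.List.pyRange a b 2).length - 1) := by
  by_cases hab : a < b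
  · rw [pyRange_two_cons hab]
    have ih := sum_pyRange_two (a + 2) b
    simp only [List.sum_cons, List.length_cons, ih]
    push_cast
    ring
  · rw [pyRange_two_nil (by omega)]
    simp
termination_by (b - a).toNat
decreasing_by all_goals omega

-- ===== VERDICT (by name: the statement is the Claim_ definition above) =====
theorem oushu_spec : Claim_equal_oushu := by
  intro begin end_ _
  unfold Spec_oushu oushu oushu_alt
  rw [oushu_foldl]
  have hp : (fun i : Int => decide (PySem.Int.mod i 2 = 0))
      = (fun i : Int => decide (i % 2 = 0)) := by
    funext i
    rw [PySem.Int.mod_eq_emod_of_pos (by norm_num : (0:Int) < 2)]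
  rw [hp, PySem.Int.mod_eq_emod_of_pos (by norm_num : (0:Int) < 2),
      filter_even_pyRange, sum_pyRange_two]
  simp
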